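-- pv_equiv track=rewrite | github.com/PauloGSP/SI | SI-I/group-project-rush-hour-97636_93343_97606_98430/student.py | get_cars_coords
-- ===== SOURCE A (Python) =====
-- def get_cars_coords(cars, car_id, moves=None):
--     """
--     Given dictionary of cars, car_id and optionally list of moves,
--     returns list of car coordinates after given move is applied
--     """
--
--     if moves:
--         x_inc, y_inc = (0,0)
--         for m in moves:
--             x_inc += 1 if m == 'd' else -1 if m == 'a' else 0
--             y_inc += 1 if m == 's' else -1 if m == 'w' else 0
--         return [ (x + x_inc, y + y_inc) for x, y in cars[car_id]['coords'] ]
--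
--     return cars[car_id]['coords']
-- ===== SOURCE B (Python) =====
-- def get_cars_coords(cars, car_id, moves=None):
--     coords = cars[car_id]['coords']
--     if not moves:
--         return coords
--     step = {'d': (1, 0), 'a': (-1, 0), 's': (0, 1), 'w': (0, -1)}
--     for m in moves:
--         dx, dy = step.get(m, (0, 0))
--         coords = [(x + dx, y + dy) for x, y in coords]
--     return coords
-- ===== Notes on version B (the rewrite author's own statement) =====
-- stated objective: alternative
-- what changed: A first accumulates a net (x_inc, y_inc) displacement over all moves and then applies it once; B never computes a net offset: it replays each move directly on the coordinate list, rebuilding the shifted list move by move via a direction table.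
import Mathlib
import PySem

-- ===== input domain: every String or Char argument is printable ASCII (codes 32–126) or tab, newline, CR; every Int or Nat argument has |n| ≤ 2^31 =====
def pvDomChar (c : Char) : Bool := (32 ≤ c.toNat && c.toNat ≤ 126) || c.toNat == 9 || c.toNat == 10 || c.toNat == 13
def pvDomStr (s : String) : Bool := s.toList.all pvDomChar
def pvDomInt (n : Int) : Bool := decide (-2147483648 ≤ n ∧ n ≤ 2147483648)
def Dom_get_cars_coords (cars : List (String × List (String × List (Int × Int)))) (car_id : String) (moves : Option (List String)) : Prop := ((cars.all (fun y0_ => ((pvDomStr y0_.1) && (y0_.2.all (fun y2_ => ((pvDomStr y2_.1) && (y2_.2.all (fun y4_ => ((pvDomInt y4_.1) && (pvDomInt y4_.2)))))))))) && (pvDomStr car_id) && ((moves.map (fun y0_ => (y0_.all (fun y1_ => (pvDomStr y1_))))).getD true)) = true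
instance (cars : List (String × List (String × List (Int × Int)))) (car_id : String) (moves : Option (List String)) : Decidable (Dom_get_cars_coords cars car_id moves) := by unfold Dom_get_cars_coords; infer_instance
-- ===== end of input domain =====

-- B replays each move on the whole coordinate list (direction table per move) instead of
-- A's net-offset accumulation followed by one shift; return value proved equal.

-- ===== PORT A =====
def get_cars_coords (cars : List (String × List (String × List (Int × Int)))) (car_id : String) (moves : Option (List String)) : List (Int × Int) :=
  let coords := (((cars.lookup car_id).getD []).lookup "coords").getD []
  match moves with
  | some ms =>
    if ms = [] then coords
    else
      let inc := ms.foldl (fun (p : Int × Int) m =>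
        (p.1 + (if m = "d" then 1 else if m = "a" then -1 else 0),
         p.2 + (if m = "s" then 1 else if m = "w" then -1 else 0))) (0, 0)
      coords.map (fun xy => (xy.1 + inc.1, xy.2 + inc.2))
  | none => coords

-- ===== PORT B =====
-- step.get(m, (0,0)) on the literal direction dict (dict -> association list per the type convention)
def pvStep (m : String) : Int × Int :=
  (([("d", ((1 : Int), (0 : Int))), ("a", (-1, 0)), ("s", (0, 1)), ("w", (0, -1))]).lookup m).getD (0, 0)

def get_cars_coords_alt (cars : List (String × List (String × List (Int × Int)))) (car_id : String) (moves : Option (List String)) : List (Int × Int) :=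
  let coords := (((cars.lookup car_id).getD []).lookup "coords").getD []
  match moves with
  | some ms =>
    if ms = [] then coords
    else
      ms.foldl (fun (cs : List (Int × Int)) m =>
        let d := pvStep m
        cs.map (fun xy => (xy.1 + d.1, xy.2 + d.2))) coords
  | none => coords

-- ===== PRECONDITION & SPEC =====
-- Pre_ excludes exactly the inputs where Python A raises KeyError: car_id missing from cars, or 'coords' missing from that car's dict.
def Pre_get_cars_coords (cars : List (String × List (String × List (Int × Int)))) (car_id : String) (moves : Option (List String)) : Prop :=
  (((cars.lookup car_id).bind (fun d => d.lookup "coords")).isSome = true)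
instance (cars : List (String × List (String × List (Int × Int)))) (car_id : String) (moves : Option (List String)) : Decidable (Pre_get_cars_coords cars car_id moves) := by unfold Pre_get_cars_coords; infer_instance
def pvWitness_get_cars_coords : (List (String × List (String × List (Int × Int)))) × String × Option (List String) :=
  ([("x", [("coords", [(1, 2), (3, 4)])])], "x", some ["d", "d", "w"])

def Spec_get_cars_coords (cars : List (String × List (String × List (Int × Int)))) (car_id : String) (moves : Option (List String)) (out : List (Int × Int)) : Prop := out = get_cars_coords_alt cars car_id moves
instance (cars : List (String × List (String × List (Int × Int)))) (car_id : String) (moves : Option (List String)) (out : List (Int × Int)) : Decidable (Spec_get_cars_coords cars car_id moves out) := by unfold Spec_get_cars_coords; infer_instance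

-- ===== CLAIM (what is proved, stated in full; the proofs are below) =====
def Claim_equal_get_cars_coords : Prop := ∀ (cars : List (String × List (String × List (Int × Int)))) (car_id : String) (moves : Option (List String)), Dom_get_cars_coords cars car_id moves → Pre_get_cars_coords cars car_id moves → Spec_get_cars_coords cars car_id moves (get_cars_coords cars car_id moves)

-- ===== LEMMAS AND PROOFS =====
lemma pvStep_eq (m : String) :
    pvStep m = ((if m = "d" then 1 else if m = "a" then -1 else 0),
                (if m = "s" then 1 else if m = "w" then -1 else 0)) := by
  simp only [pvStep, List.lookup]
  cases hd : (m == "d") <;> cases ha : (m == "a") <;> cases hs : (m == "s") <;> cases hw : (m == "w") <;>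
    simp_all

lemma fold_replay_eq (ms : List String) : ∀ (coords : List (Int × Int)) (p : Int × Int),
    ms.foldl (fun (cs : List (Int × Int)) m =>
        let d := pvStep m
        cs.map (fun xy => (xy.1 + d.1, xy.2 + d.2))) (coords.map (fun xy => (xy.1 + p.1, xy.2 + p.2)))
      = coords.map (fun xy =>
          (xy.1 + (ms.foldl (fun (q : Int × Int) m => (q.1 + (pvStep m).1, q.2 + (pvStep m).2)) p).1,
           xy.2 + (ms.foldl (fun (q : Int × Int) m => (q.1 + (pvStep m).1, q.2 + (pvStep m).2)) p).2)) := by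
  induction ms with
  | nil => intro coords p; simp
  | cons m ms ih =>
    intro coords p
    simp only [List.foldl_cons, List.map_map]
    have hcomp : ((fun xy : Int × Int => (xy.1 + (pvStep m).1, xy.2 + (pvStep m).2)) ∘
        (fun xy : Int × Int => (xy.1 + p.1, xy.2 + p.2)))
        = fun xy : Int × Int => (xy.1 + (p.1 + (pvStep m).1, p.2 + (pvStep m).2).1,
                                 xy.2 + (p.1 + (pvStep m).1, p.2 + (pvStep m).2).2) := by
      funext xy; simp [Function.comp]; constructor <;> ring
    rw [hcomp, ih coords (p.1 + (pvStep m).1, p.2 + (pvStep m).2)]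

lemma inc_fold_eq (ms : List String) :
    ms.foldl (fun (p : Int × Int) m =>
        (p.1 + (if m = "d" then 1 else if m = "a" then -1 else 0),
         p.2 + (if m = "s" then 1 else if m = "w" then -1 else 0))) (0, 0)
      = ms.foldl (fun (q : Int × Int) m => (q.1 + (pvStep m).1, q.2 + (pvStep m).2)) (0, 0) := by
  have : (fun (q : Int × Int) m => (q.1 + (pvStep m).1, q.2 + (pvStep m).2))
      = fun (p : Int × Int) m =>
        (p.1 + (if m = "d" then 1 else if m = "a" then -1 else 0),
         p.2 + (if m = "s" then 1 else if m = "w" then -1 else 0)) := by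
    funext q m; rw [pvStep_eq]
  rw [this]

-- ===== VERDICT (by name: the statement is the Claim_ definition above) =====
theorem get_cars_coords_spec : Claim_equal_get_cars_coords := by
  intro cars car_id moves _ _
  unfold Spec_get_cars_coords get_cars_coords get_cars_coords_alt
  cases moves with
  | none => rfl
  | some ms =>
    by_cases h : ms = []
    · simp [h]
    · simp only [h, if_false]
      have h0 : (((cars.lookup car_id).getD []).lookup "coords").getD []
          = ((((cars.lookup car_id).getD []).lookup "coords").getD []).map
              (fun xy : Int × Int => (xy.1 + (0 : Int × Int).1, xy.2 + (0 : Int × Int).2)) := by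
        simp
      rw [inc_fold_eq]
      conv_rhs => rw [h0, fold_replay_eq]
      rfl
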